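-- pv_equiv track=rewrite | github.com/isi-usc-edu/pyLIQTR | src/pyLIQTR/sim_methods/quantum_ops.py | ps_text_pad
-- ===== SOURCE A (Python) =====
-- def ps_text_pad(sites,string,N):
--
--     padded = ''
--
--     ## Check if we have been given a scalar or a tuple.
--     ##
--     is_tuple = hasattr(sites, "__len__")
--
--     if (is_tuple):
--         for k in range(N):
--             if (k in sites):
--                 sidx    = sites.index(k)
--                 padded += string[sidx]
--             else:
--                 padded += 'I'
--     else:
--         padded = 'I'*(sites) + string + 'I'*(N-sites-1)
--
--     return(padded)
-- ===== SOURCE B (Python) =====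
-- def ps_text_pad(sites, string, N):
--     ## Scalar vs tuple dispatch, same as the original.
--     is_tuple = hasattr(sites, "__len__")
--     if is_tuple:
--         ## Scatter pass: place string[idx] at the first in-range occurrence of
--         ## each site; everything else stays 'I'.
--         result = ['I'] * N
--         placed = set()
--         for idx, site in enumerate(sites):
--             if 0 <= site < N and site not in placed:
--                 result[site] = string[idx]
--                 placed.add(site)
--         return ''.join(result)
--     else:
--         return 'I' * sites + string + 'I' * (N - sites - 1)
-- ===== Notes on version B (the rewrite author's own statement) =====
-- stated objective: faster
-- what changed: Replaces A's per-position gather (for each of the N output positions, a membership test plus sites.index scan) with a single scatter pass over sites into a preallocated 'I' buffer, using a placed-set for first-index-wins semantics.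
import Mathlib
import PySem

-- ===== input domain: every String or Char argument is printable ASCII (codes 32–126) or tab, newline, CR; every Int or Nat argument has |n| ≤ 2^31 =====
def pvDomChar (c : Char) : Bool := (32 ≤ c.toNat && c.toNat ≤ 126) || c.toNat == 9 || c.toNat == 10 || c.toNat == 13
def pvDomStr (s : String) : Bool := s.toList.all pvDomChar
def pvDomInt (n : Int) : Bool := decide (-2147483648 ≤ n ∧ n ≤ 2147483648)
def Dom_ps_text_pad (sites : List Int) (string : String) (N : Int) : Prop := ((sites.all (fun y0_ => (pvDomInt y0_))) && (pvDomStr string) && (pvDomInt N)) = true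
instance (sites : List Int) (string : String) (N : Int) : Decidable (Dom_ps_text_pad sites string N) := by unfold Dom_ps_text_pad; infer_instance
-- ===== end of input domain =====

-- B replaces A's per-position gather (membership test + list.index for each of the N
-- output positions) by one scatter pass over `sites` into a preallocated 'I' buffer;
-- objective: faster (O(N) + O(len(sites)) instead of O(N·len(sites))).

-- ===== PORT A =====
-- A list always has __len__, so for this signature `is_tuple` is True and the scalar
-- branch of A is dead code; only the tuple branch is ported.
def ps_text_pad (sites : List Int) (string : String) (N : Int) : String :=
  String.mk <|
    (PySem.List.pyRange 0 N).foldl (fun padded k =>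
      if sites.contains k then
        match PySem.List.index? sites k with
        | some sidx =>
          match PySem.List.pyGet? string.toList (sidx : Int) with
          | some c => padded ++ [c]
          | none => padded          -- string[sidx] raises IndexError; excluded by Pre_
        | none => padded            -- unreachable: k ∈ sites
      else padded ++ ['I']) []

-- ===== PORT B =====
-- the `for idx, site in enumerate(sites)` scatter loop of Source B, idx carried explicitly
def pvScatter (string : List Char) (N : Int) :
    List Int → Nat → List Char → PySem.Set Int → List Char
  | [], _, result, _ => result
  | site :: rest, idx, result, placed =>
    if 0 ≤ site ∧ site < N ∧ site ∉ placed then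
      match string[idx]? with
      | some c => pvScatter string N rest (idx + 1) (result.set site.toNat c) (placed.add site)
      | none => result              -- string[idx] raises IndexError; excluded by Pre_
    else pvScatter string N rest (idx + 1) result placed

def ps_text_pad_alt (sites : List Int) (string : String) (N : Int) : String :=
  String.mk (pvScatter string.toList N sites 0 (List.replicate N.toNat 'I') PySem.Set.empty)

-- ===== PRECONDITION & SPEC =====
-- Pre_ excludes exactly the inputs where A raises IndexError: some position k in
-- range(N) occurs in sites with first occurrence index ≥ len(string).
def Pre_ps_text_pad (sites : List Int) (string : String) (N : Int) : Prop :=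
  ∀ k ∈ sites, 0 ≤ k → k < N →
    (((PySem.List.index? sites k).getD 0 : Int) < PySem.Str.len string)
instance (sites : List Int) (string : String) (N : Int) : Decidable (Pre_ps_text_pad sites string N) := by unfold Pre_ps_text_pad; infer_instance
def pvWitness_ps_text_pad : List Int × String × Int := ([0, 2], "XY", 3)

def Spec_ps_text_pad (sites : List Int) (string : String) (N : Int) (out : String) : Prop := out = ps_text_pad_alt sites string N
instance (sites : List Int) (string : String) (N : Int) (out : String) : Decidable (Spec_ps_text_pad sites string N out) := by unfold Spec_ps_text_pad; infer_instance

-- ===== CLAIM (what is proved, stated in full; the proofs are below) =====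
def Claim_equal_ps_text_pad : Prop := ∀ (sites : List Int) (string : String) (N : Int), Dom_ps_text_pad sites string N → Pre_ps_text_pad sites string N → Spec_ps_text_pad sites string N (ps_text_pad sites string N)

-- ===== LEMMAS AND PROOFS =====

-- the character both programs put at output position p
def pvGather (sites : List Int) (str : List Char) (p : Nat) : Char :=
  match PySem.List.index? sites (p : Int) with
  | some j => str.getD j 'I'
  | none => 'I'

lemma pvRange_cast (N : Int) :
    PySem.List.pyRange 0 N = (List.range N.toNat).map (fun k : Nat => (k : Int)) := by
  by_cases h : 0 ≤ N
  · have h2 := PySem.List.pyRange_zero_natCast N.toNat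
    rwa [Int.toNat_of_nonneg h] at h2
  · have h1 : N.toNat = 0 := by omega
    have h2 : ¬ ((0 : Int) < N) := by omega
    simp [PySem.List.pyRange, h1, h2]

-- first-occurrence index of a fresh in-range element
lemma index?_of_fresh (sites : List Int) (j : Nat) (hj : j < sites.length)
    (hfresh : sites[j] ∉ sites.take j) :
    PySem.List.index? sites sites[j] = some j := by
  have hdec : sites = sites.take j ++ sites[j] :: sites.drop (j + 1) := by
    conv_lhs => rw [← List.take_append_drop j sites, List.drop_eq_getElem_cons hj]
  rw [PySem.List.index?_eq_some_iff]
  exact ⟨sites.take j, sites.drop (j + 1), hdec, by simp [List.length_take, hj.le], hfresh⟩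

lemma pvScatter_length (string : List Char) (N : Int) :
    ∀ (sites : List Int) (idx : Nat) (res : List Char) (placed : PySem.Set Int),
      (pvScatter string N sites idx res placed).length = res.length := by
  intro sites
  induction sites with
  | nil => intro idx res placed; rfl
  | cons s rest ih =>
    intro idx res placed
    simp only [pvScatter]
    split
    · cases hget : string[idx]? with
      | some c => simpa using ih (idx + 1) (res.set s.toNat c) (placed.add s)
      | none => rfl
    · exact ih (idx + 1) res placed

lemma pvScatter_get (string : List Char) (N : Int) :
    ∀ (sites : List Int) (idx : Nat) (res : List Char) (placed : PySem.Set Int),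
      res.length = N.toNat →
      (∀ (j : Nat) (hj : j < sites.length), 0 ≤ sites[j] → sites[j] < N →
        sites[j] ∉ placed → sites[j] ∉ sites.take j → idx + j < string.length) →
      ∀ (p : Nat),
        (pvScatter string N sites idx res placed)[p]? =
          if ((p : Int) < N ∧ (p : Int) ∉ placed) then
            (match PySem.List.index? sites (p : Int) with
             | some j => string[idx + j]?
             | none => res[p]?)
          else res[p]? := by
  intro sites
  induction sites with
  | nil =>
    intro idx res placed _ _ p
    simp only [pvScatter, PySem.List.index?, List.idxOf?_nil]
    split <;> rfl
  | cons s rest ih =>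
    intro idx res placed hlen hacc p
    simp only [pvScatter]
    by_cases hc : 0 ≤ s ∧ s < N ∧ s ∉ placed
    · -- the head is placed
      have hidx : idx < string.length := by
        have := hacc 0 (by simp) (by simpa using hc.1) (by simpa using hc.2.1)
          (by simpa using hc.2.2) (by simp)
        omega
      have hget : string[idx]? = some string[idx] := List.getElem?_eq_getElem hidx
      rw [if_pos hc, hget]
      have hacc' : ∀ (j : Nat) (hj : j < rest.length), 0 ≤ rest[j] → rest[j] < N →
          rest[j] ∉ placed.add s → rest[j] ∉ rest.take j → (idx + 1) + j < string.length := by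
        intro j hj h0 hN hpl htk
        have hne : rest[j] ≠ s ∧ rest[j] ∉ placed := by
          constructor
          · intro he; exact hpl ((PySem.Set.mem_add placed s rest[j]).mpr (Or.inr he))
          · intro he; exact hpl ((PySem.Set.mem_add placed s rest[j]).mpr (Or.inl he))
        have := hacc (j + 1) (by simpa using Nat.succ_lt_succ hj) (by simpa using h0)
          (by simpa using hN) (by simpa using hne.2)
          (by simp only [List.take_succ_cons, List.mem_cons, not_or]; exact ⟨hne.1, htk⟩)
        omega
      rw [ih (idx + 1) (res.set s.toNat string[idx]) (placed.add s) (by simp [hlen]) hacc' p]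
      by_cases hp : (p : Int) = s
      · have hps : p = s.toNat := by omega
        have hplen : p < res.length := by omega
        have hmem : (p : Int) ∈ placed.add s := (PySem.Set.mem_add placed s _).mpr (Or.inr hp)
        rw [if_neg (by tauto)]
        rw [if_pos ⟨by omega, by rw [hp]; exact hc.2.2⟩]
        have : PySem.List.index? (s :: rest) (p : Int) = some 0 := by
          simp [PySem.List.index?, List.idxOf?_cons, hp]
        rw [this]
        simp only [Nat.add_zero]
        rw [hget, hps, List.getElem?_set_self (by omega)]
      · have hmem : (p : Int) ∈ placed.add s ↔ (p : Int) ∈ placed := by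
          rw [PySem.Set.mem_add]; tauto
        have hset : (res.set s.toNat string[idx])[p]? = res[p]? :=
          List.getElem?_set_ne (by omega)
        have hcons : PySem.List.index? (s :: rest) (p : Int)
            = (PySem.List.index? rest (p : Int)).map (· + 1) := by
          simp [PySem.List.index?, List.idxOf?_cons, Ne.symm hp]
        by_cases hcond : (p : Int) < N ∧ (p : Int) ∉ placed
        · rw [if_pos (by tauto), if_pos hcond, hcons]
          cases PySem.List.index? rest (p : Int) with
          | some j => simp only [Option.map_some]; congr 1; omega
          | none => simpa using hset
        · rw [if_neg (by tauto), if_neg hcond]; exact hset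
    · -- head skipped
      rw [if_neg hc]
      have hacc' : ∀ (j : Nat) (hj : j < rest.length), 0 ≤ rest[j] → rest[j] < N →
          rest[j] ∉ placed → rest[j] ∉ rest.take j → (idx + 1) + j < string.length := by
        intro j hj h0 hN hpl htk
        have hne : rest[j] ≠ s := by
          intro he
          exact hc ⟨by omega, by omega, by rw [← he]; exact hpl⟩
        have := hacc (j + 1) (by simpa using Nat.succ_lt_succ hj) (by simpa using h0)
          (by simpa using hN) (by simpa using hpl)
          (by simp only [List.take_succ_cons, List.mem_cons, not_or]; exact ⟨hne, htk⟩)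
        omega
      rw [ih (idx + 1) res placed hlen hacc' p]
      by_cases hcond : (p : Int) < N ∧ (p : Int) ∉ placed
      · rw [if_pos hcond, if_pos hcond]
        have hp : (p : Int) ≠ s := by
          intro he
          exact hc ⟨by omega, by omega, by rw [← he]; exact hcond.2⟩
        have hcons : PySem.List.index? (s :: rest) (p : Int)
            = (PySem.List.index? rest (p : Int)).map (· + 1) := by
          simp [PySem.List.index?, List.idxOf?_cons, Ne.symm hp]
        rw [hcons]
        cases PySem.List.index? rest (p : Int) with
        | some j => simp only [Option.map_some]; congr 1; omega
        | none => rfl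
      · rw [if_neg hcond, if_neg hcond]

-- A's loop produces the gather map
lemma ps_text_pad_eq_map (sites : List Int) (string : String) (N : Int)
    (hpre : Pre_ps_text_pad sites string N) :
    ps_text_pad sites string N
      = String.mk ((List.range N.toNat).map (pvGather sites string.toList)) := by
  unfold ps_text_pad
  rw [pvRange_cast, List.foldl_map]
  have hstep : ∀ (acc : List Char), ∀ k ∈ List.range N.toNat,
      (fun padded (k : Nat) =>
        if sites.contains (k : Int) then
          match PySem.List.index? sites (k : Int) with
          | some sidx =>
            match PySem.List.pyGet? string.toList (sidx : Int) with
            | some c => padded ++ [c]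
            | none => padded
          | none => padded
        else padded ++ ['I']) acc k
      = acc ++ [pvGather sites string.toList k] := by
    intro acc k hk
    beta_reduce
    have hkN : (k : Int) < N := by
      have := List.mem_range.mp hk
      omega
    by_cases hmem : (k : Int) ∈ sites
    · rw [if_pos (by simpa using hmem)]
      cases hidx : PySem.List.index? sites (k : Int) with
      | none =>
        have hs := (PySem.List.index?_isSome_iff sites ((k : Nat) : Int)).mpr hmem
        rw [hidx] at hs
        simp at hs
      | some j =>
        have hj : (j : Int) < PySem.Str.len string := by
          have := hpre (k : Int) hmem (by omega) hkN
          rwa [hidx] at this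
        have hjlen : j < string.toList.length := by
          rw [PySem.Str.len_eq] at hj
          omega
        have hget : PySem.List.pyGet? string.toList (j : Int)
            = some string.toList[j] := by
          rw [PySem.List.pyGet?_natCast]
          exact List.getElem?_eq_getElem hjlen
        simp only [hget, pvGather, hidx]
        rw [List.getD_eq_getElem _ _ hjlen]
    · rw [if_neg (by simpa using hmem)]
      have : PySem.List.index? sites (k : Int) = none := by
        cases h : PySem.List.index? sites (k : Int) with
        | none => rfl
        | some j =>
          exact absurd ((PySem.List.index?_isSome_iff sites _).mp (by rw [h]; rfl)) hmem
      simp only [pvGather, this]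
  rw [PySem.List.foldl_congr_mem _ _ _ _ hstep, PySem.List.foldl_append_singleton_eq_map]
  rfl

-- ===== VERDICT (by name: the statement is the Claim_ definition above) =====
theorem ps_text_pad_spec : Claim_equal_ps_text_pad := by
  intro sites string N _ hpre
  unfold Spec_ps_text_pad
  rw [ps_text_pad_eq_map sites string N hpre]
  unfold ps_text_pad_alt
  congr 1
  apply List.ext_getElem?
  intro p
  have hlen : (pvScatter string.toList N sites 0 (List.replicate N.toNat 'I')
      PySem.Set.empty).length = N.toNat := by
    rw [pvScatter_length]; simp
  have hacc : ∀ (j : Nat) (hj : j < sites.length), 0 ≤ sites[j] → sites[j] < N →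
      sites[j] ∉ (PySem.Set.empty : PySem.Set Int) → sites[j] ∉ sites.take j →
      0 + j < string.toList.length := by
    intro j hj h0 hN _ htk
    have hidx := index?_of_fresh sites j hj htk
    have := hpre sites[j] (List.getElem_mem hj) h0 hN
    rw [hidx, PySem.Str.len_eq] at this
    simpa using (by exact_mod_cast this : j < string.toList.length)
  by_cases hp : p < N.toNat
  · have hN0 : (p : Int) < N := by omega
    rw [pvScatter_get string.toList N sites 0 (List.replicate N.toNat 'I')
      PySem.Set.empty (by simp) hacc p]
    rw [if_pos ⟨hN0, by simp [PySem.Set.empty]⟩]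
    rw [List.getElem?_map, List.getElem?_range hp]
    simp only [Option.map_some]
    cases hidx : PySem.List.index? sites (p : Int) with
    | some j =>
      have hmem : (p : Int) ∈ sites :=
        (PySem.List.index?_isSome_iff sites _).mp (by rw [hidx]; rfl)
      have hjl : j < string.toList.length := by
        have := hpre (p : Int) hmem (by omega) hN0
        rw [hidx, PySem.Str.len_eq] at this
        exact_mod_cast this
      simp only [pvGather, hidx,
        List.getElem?_eq_getElem (show 0 + j < string.toList.length by omega)]
      rw [List.getD_eq_getElem _ _ hjl]
      simp
    | none =>
      simp [pvGather, (show List.idxOf? ((p : Nat) : Int) sites = none from hidx)]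
      rw [List.getElem?_replicate, if_pos hp]
  · rw [List.getElem?_eq_none (by simp; omega),
      List.getElem?_eq_none (by rw [hlen]; omega)]
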